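-- pv_equiv track=rewrite | github.com/mariana-jg/TDABuchwald | TP3/Algoritmos/aproximacion.py | aproximacion_tribu_agua
-- ===== SOURCE A (Python) =====
-- def aproximacion_tribu_agua(fuerzas, k):
--     # Inicializar k grupos vacios
--     grupos = [[] for _ in range(k)]
--
--     # Ordenar las fuerzas de mayor a menor
--     fuerzas.sort(key=lambda x: x[1], reverse=True)
--
--     # Asignar cada fuerza al grupo con menor suma hasta el momento
--     for nombre, fuerza in fuerzas:
--         grupo_con_menor_suma = min(grupos, key=lambda grupo: sum(f[1] for f in grupo))
--         grupo_con_menor_suma.append((nombre, fuerza))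
--
--     # Calcular el costo de la aproximacion
--     costo = sum(sum(fuerza for _, fuerza in grupo)**2 for grupo in grupos)
--
--     return grupos, costo
-- ===== SOURCE B (Python) =====
-- def aproximacion_tribu_agua(fuerzas, k):
--     # Sort strongest first (same in-place sort as A; mutation of `fuerzas` is shared behaviour)
--     fuerzas.sort(key=lambda x: x[1], reverse=True)
--     grupos = [[] for _ in range(k)]
--     # running per-group sums: no re-summing of already-placed members
--     sumas = [0] * len(grupos)
--     for nombre, fuerza in fuerzas:
--         j = min(range(len(sumas)), key=sumas.__getitem__)
--         grupos[j].append((nombre, fuerza))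
--         sumas[j] += fuerza
--     return grupos, sum(s * s for s in sumas)
-- ===== Notes on version B (the rewrite author's own statement) =====
-- stated objective: faster
-- what changed: B keeps a running sum per group and picks the lightest group by a single argmin scan over those k sums (computing the final cost from them too), instead of A's re-summing every member of every group at each of the n assignment steps.
import Mathlib
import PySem

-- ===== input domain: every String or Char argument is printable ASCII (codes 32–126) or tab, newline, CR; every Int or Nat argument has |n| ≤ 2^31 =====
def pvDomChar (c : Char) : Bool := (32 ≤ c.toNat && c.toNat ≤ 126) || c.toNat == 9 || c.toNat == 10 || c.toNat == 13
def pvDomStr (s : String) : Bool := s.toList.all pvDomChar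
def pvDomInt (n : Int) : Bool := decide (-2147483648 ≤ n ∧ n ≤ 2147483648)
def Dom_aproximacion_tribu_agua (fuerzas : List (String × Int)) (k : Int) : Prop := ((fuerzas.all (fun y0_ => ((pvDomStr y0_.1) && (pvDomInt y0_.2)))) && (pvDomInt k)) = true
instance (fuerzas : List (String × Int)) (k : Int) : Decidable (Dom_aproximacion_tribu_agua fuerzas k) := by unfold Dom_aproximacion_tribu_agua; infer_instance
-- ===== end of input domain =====

-- B replaces A's per-step re-summing of every group (min with key=sum) by running per-group
-- sums with an argmin scan over them; objective: faster. Both Pythons sort `fuerzas` in place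
-- (same mutation); the equivalence proved here is about the return value.

-- ===== PORT A =====
-- sum(f[1] for f in grupo)
def pvSumA (g : List (String × Int)) : Int := g.foldl (fun a p => a + p.2) 0

-- index of the FIRST group with minimal sum (Python's min returns that group; the port
-- locates it by index so the in-place append becomes a List.set)
def pvArgminGoA : List (List (String × Int)) → Int → Nat → Nat → Nat
  | [], _, bi, _ => bi
  | g :: t, bk, bi, i =>
      if pvSumA g < bk then pvArgminGoA t (pvSumA g) i (i+1) else pvArgminGoA t bk bi (i+1)

def pvArgminA : List (List (String × Int)) → Nat
  | [] => 0          -- unreachable under Pre_ (Python's min raises on an empty sequence)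
  | g :: t => pvArgminGoA t (pvSumA g) 0 1

def aproximacion_tribu_agua (fuerzas : List (String × Int)) (k : Int) : (List (List (String × Int))) × Int :=
  let grupos0 : List (List (String × Int)) := List.replicate k.toNat []
  let fz := PySem.List.sorted fuerzas (fun x => x.2) true
  let grupos := fz.foldl (fun gs x =>
      let j := pvArgminA gs
      gs.set j (gs.getD j [] ++ [x])) grupos0
  (grupos, grupos.foldl (fun a g => a + (pvSumA g) ^ 2) 0)

-- ===== PORT B =====
-- min(range(len(sumas)), key=sumas.__getitem__): first index of a minimal running sum
def pvArgminGoB : List Int → Int → Nat → Nat → Nat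
  | [], _, bi, _ => bi
  | s :: t, bk, bi, i =>
      if s < bk then pvArgminGoB t s i (i+1) else pvArgminGoB t bk bi (i+1)

def pvArgminB : List Int → Nat
  | [] => 0          -- unreachable under Pre_ (Python's min raises on an empty sequence)
  | s :: t => pvArgminGoB t s 0 1

def aproximacion_tribu_agua_alt (fuerzas : List (String × Int)) (k : Int) : (List (List (String × Int))) × Int :=
  let fz := PySem.List.sorted fuerzas (fun x => x.2) true
  let grupos0 : List (List (String × Int)) := List.replicate k.toNat []
  let sumas0 : List Int := List.replicate grupos0.length 0
  let st := fz.foldl (fun (st : List (List (String × Int)) × List Int) x =>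
      let j := pvArgminB st.2
      (st.1.set j (st.1.getD j [] ++ [x]), st.2.set j (st.2.getD j 0 + x.2))) (grupos0, sumas0)
  (st.1, st.2.foldl (fun a s => a + s * s) 0)

-- ===== PRECONDITION & SPEC =====
-- Pre_ excludes exactly the inputs where Python A raises: with a nonempty `fuerzas` and k ≤ 0
-- there are no groups and min([]) raises ValueError (B raises there too).
def Pre_aproximacion_tribu_agua (fuerzas : List (String × Int)) (k : Int) : Prop :=
  fuerzas = [] ∨ 1 ≤ k
instance (fuerzas : List (String × Int)) (k : Int) : Decidable (Pre_aproximacion_tribu_agua fuerzas k) := by unfold Pre_aproximacion_tribu_agua; infer_instance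

def pvWitness_aproximacion_tribu_agua : (List (String × Int)) × Int := ([("a", 3), ("b", 1)], 2)

def Spec_aproximacion_tribu_agua (fuerzas : List (String × Int)) (k : Int) (out : (List (List (String × Int))) × Int) : Prop := out = aproximacion_tribu_agua_alt fuerzas k
instance (fuerzas : List (String × Int)) (k : Int) (out : (List (List (String × Int))) × Int) : Decidable (Spec_aproximacion_tribu_agua fuerzas k out) := by unfold Spec_aproximacion_tribu_agua; infer_instance

-- ===== CLAIM (what is proved, stated in full; the proofs are below) =====
def Claim_equal_aproximacion_tribu_agua : Prop := ∀ (fuerzas : List (String × Int)) (k : Int), Dom_aproximacion_tribu_agua fuerzas k → Pre_aproximacion_tribu_agua fuerzas k → Spec_aproximacion_tribu_agua fuerzas k (aproximacion_tribu_agua fuerzas k)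

-- ===== LEMMAS AND PROOFS =====

-- the two argmin scans agree when B's sums are the sums of A's groups
theorem argminGo_map (gs : List (List (String × Int))) :
    ∀ bk bi i, pvArgminGoB (gs.map pvSumA) bk bi i = pvArgminGoA gs bk bi i := by
  induction gs with
  | nil => intro bk bi i; rfl
  | cons g t ih =>
      intro bk bi i
      simp only [List.map_cons, pvArgminGoB, pvArgminGoA]
      split <;> exact ih _ _ _

theorem argmin_map (gs : List (List (String × Int))) :
    pvArgminB (gs.map pvSumA) = pvArgminA gs := by
  cases gs with
  | nil => rfl
  | cons g t => simp [pvArgminB, pvArgminA, argminGo_map]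

theorem sumA_append (g : List (String × Int)) (x : String × Int) :
    pvSumA (g ++ [x]) = pvSumA g + x.2 := by
  simp [pvSumA, List.foldl_append]

theorem getD_map_sum (gs : List (List (String × Int))) :
    ∀ j, (gs.map pvSumA).getD j 0 = pvSumA (gs.getD j []) := by
  induction gs with
  | nil => intro j; rfl
  | cons g t ih => intro j; cases j with
      | zero => rfl
      | succ j => simpa using ih j

-- the loop invariant: B's running sums are the sums of the groups built so far
theorem loop_inv (l : List (String × Int)) :
    ∀ gs : List (List (String × Int)),
      l.foldl (fun (st : List (List (String × Int)) × List Int) x =>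
          let j := pvArgminB st.2
          (st.1.set j (st.1.getD j [] ++ [x]), st.2.set j (st.2.getD j 0 + x.2)))
        (gs, gs.map pvSumA)
      = (let gs' := l.foldl (fun gs x => let j := pvArgminA gs; gs.set j (gs.getD j [] ++ [x])) gs;
         (gs', gs'.map pvSumA)) := by
  induction l with
  | nil => intro gs; rfl
  | cons x t ih =>
      intro gs
      simp only [List.foldl_cons]
      have hstep : ((gs.map pvSumA).set (pvArgminB (gs.map pvSumA))
            ((gs.map pvSumA).getD (pvArgminB (gs.map pvSumA)) 0 + x.2))
          = (gs.set (pvArgminA gs) (gs.getD (pvArgminA gs) [] ++ [x])).map pvSumA := by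
        rw [argmin_map, getD_map_sum, List.map_set, sumA_append]
      have := ih (gs.set (pvArgminA gs) (gs.getD (pvArgminA gs) [] ++ [x]))
      simp only [argmin_map] at *
      rw [hstep]
      exact this

theorem cost_map (gs : List (List (String × Int))) :
    (gs.map pvSumA).foldl (fun a s => a + s * s) 0
      = gs.foldl (fun a g => a + (pvSumA g) ^ 2) 0 := by
  rw [List.foldl_map]
  congr 1
  funext a g
  ring

-- ===== VERDICT (by name: the statement is the Claim_ definition above) =====
theorem aproximacion_tribu_agua_spec : Claim_equal_aproximacion_tribu_agua := by
  intro fuerzas k _ _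
  unfold Spec_aproximacion_tribu_agua aproximacion_tribu_agua aproximacion_tribu_agua_alt
  simp only []
  have h0 : (List.replicate k.toNat ([] : List (String × Int))).map pvSumA
      = List.replicate (List.replicate k.toNat ([] : List (String × Int))).length (0 : Int) := by
    simp [List.map_replicate, pvSumA]
  rw [← h0, loop_inv, cost_map]
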